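-- pv_equiv track=rewrite | github.com/leoteissier/Pile_Ou_Face-v0.1.0 | backends/dynamic/engine/unicorn/tracer.py | _byte_matches_scanset
-- ===== SOURCE A (Python) =====
-- def _byte_matches_scanset(byte: int, scanset: str) -> bool:
--     if scanset == "":
--         return False
--     invert = scanset.startswith("^")
--     spec = scanset[1:] if invert else scanset
--     idx = 0
--     matched = False
--     while idx < len(spec):
--         ch = spec[idx]
--         if idx + 2 < len(spec) and spec[idx + 1] == "-":
--             start = ord(ch)
--             end = ord(spec[idx + 2])
--             if min(start, end) <= byte <= max(start, end):
--                 matched = True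
--             idx += 3
--             continue
--         if byte == ord(ch):
--             matched = True
--         idx += 1
--     return not matched if invert else matched
-- ===== SOURCE B (Python) =====
-- def _byte_matches_scanset(byte: int, scanset: str) -> bool:
--     # Single char-by-char fold with a 3-state machine (no lookahead, no index jumps):
--     # state = (pending char or None, dash-seen flag); ranges are recognised on the
--     # character AFTER the dash, and a final flush emits any leftover literals.
--     if scanset == "":
--         return False
--     invert = scanset.startswith("^")
--     spec = scanset[1:] if invert else scanset
--     matched = False
--     pending = None
--     dash = False
--     for ch in spec:
--         if pending is None:
--             pending = ch
--         elif not dash: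
--             if ch == "-":
--                 dash = True
--             else:
--                 matched = matched or byte == ord(pending)
--                 pending = ch
--         else:
--             lo, hi = sorted((ord(pending), ord(ch)))
--             matched = matched or lo <= byte <= hi
--             pending, dash = None, False
--     if pending is not None:
--         matched = matched or byte == ord(pending)
--         if dash:
--             matched = matched or byte == ord("-")
--     return not matched if invert else matched
-- ===== Notes on version B (the rewrite author's own statement) =====
-- stated objective: alternative
-- what changed: Replaced A's index-jump loop with 3-char lookahead by a single character-by-character fold over the spec driven by a three-state machine (no pending char / pending char / dash seen) plus a final flush for leftover literals.
import Mathlib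
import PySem

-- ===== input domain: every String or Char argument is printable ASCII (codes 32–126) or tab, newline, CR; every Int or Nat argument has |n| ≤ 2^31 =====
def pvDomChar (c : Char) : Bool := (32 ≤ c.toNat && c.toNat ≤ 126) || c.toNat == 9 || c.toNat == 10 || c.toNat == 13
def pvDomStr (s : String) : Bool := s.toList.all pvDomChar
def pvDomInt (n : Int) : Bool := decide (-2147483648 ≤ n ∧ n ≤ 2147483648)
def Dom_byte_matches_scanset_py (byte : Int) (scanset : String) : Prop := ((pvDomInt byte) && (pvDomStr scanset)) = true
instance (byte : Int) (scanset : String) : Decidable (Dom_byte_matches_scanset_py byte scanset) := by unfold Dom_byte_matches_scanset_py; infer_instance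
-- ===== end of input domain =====

-- B replaces A's index-jump lookahead loop by a char-by-char fold over a three-state machine with a final flush (alternative decomposition, same cost).


-- ===== PORT A =====
-- A's while loop over `spec` carrying the `matched` flag; the `idx+2 < len(spec)`
-- lookahead is exactly "at least two more characters after `ch`", i.e. the
-- three-element pattern below; indices are replaced by the structural tail.
def pvLoopA (byte : Int) : List Char → Bool → Bool
  | [], matched => matched
  | ch :: d :: e :: rest, matched =>
      if d = '-' then
        -- start = ord(ch), end = ord(spec[idx+2])
        pvLoopA byte rest (if min (ch.toNat : Int) (e.toNat : Int) ≤ byte ∧ byte ≤ max (ch.toNat : Int) (e.toNat : Int) then true else matched)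
      else
        pvLoopA byte (d :: e :: rest) (if byte = (ch.toNat : Int) then true else matched)
  | ch :: rest, matched =>
      pvLoopA byte rest (if byte = (ch.toNat : Int) then true else matched)
  termination_by cs _ => cs.length

def byte_matches_scanset_py (byte : Int) (scanset : String) : Bool :=
  if scanset = "" then false
  else
    -- scanset.startswith("^") and scanset[1:] ported on the character list (exact on all strings)
    let cs := scanset.toList
    let invert := cs.head? = some '^'
    let spec := if invert then cs.drop 1 else cs
    let matched := pvLoopA byte spec false
    if invert then !matched else matched

-- ===== PORT B =====
-- Source B's state machine: state = (matched, pending, dash); one transition per character.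
def pvStep (byte : Int) (st : Bool × Option Char × Bool) (ch : Char) : Bool × Option Char × Bool :=
  match st with
  | (m, none, _) => (m, some ch, false)
  | (m, some p, false) =>
      if ch = '-' then (m, some p, true)
      else (m || decide (byte = (p.toNat : Int)), some ch, false)
  | (m, some p, true) =>
      -- lo, hi = sorted((ord(pending), ord(ch)))
      (m || decide (min (p.toNat : Int) (ch.toNat : Int) ≤ byte ∧ byte ≤ max (p.toNat : Int) (ch.toNat : Int)), none, false)

-- Source B's final flush of a leftover pending literal (and a trailing dash).
def pvFlush (byte : Int) : Bool × Option Char × Bool → Bool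
  | (m, none, _) => m
  | (m, some p, dash) =>
      let m' := m || decide (byte = (p.toNat : Int))
      if dash then m' || decide (byte = (('-').toNat : Int)) else m'

def byte_matches_scanset_py_alt (byte : Int) (scanset : String) : Bool :=
  if scanset = "" then false
  else
    let cs := scanset.toList
    let invert := cs.head? = some '^'
    let spec := if invert then cs.drop 1 else cs
    let matched := pvFlush byte (spec.foldl (pvStep byte) (false, none, false))
    if invert then !matched else matched

-- ===== PRECONDITION & SPEC =====
def Spec_byte_matches_scanset_py (byte : Int) (scanset : String) (out : Bool) : Prop := out = byte_matches_scanset_py_alt byte scanset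
instance (byte : Int) (scanset : String) (out : Bool) : Decidable (Spec_byte_matches_scanset_py byte scanset out) := by unfold Spec_byte_matches_scanset_py; infer_instance

-- ===== CLAIM (what is proved, stated in full; the proofs are below) =====
def Claim_equal_byte_matches_scanset_py : Prop := ∀ (byte : Int) (scanset : String), Dom_byte_matches_scanset_py byte scanset → Spec_byte_matches_scanset_py byte scanset (byte_matches_scanset_py byte scanset)

-- ===== LEMMAS AND PROOFS =====

theorem pvIfOr (c : Prop) [Decidable c] (m : Bool) : (if c then true else m) = (m || decide c) := by
  by_cases h : c <;> simp [h]

-- B's fold started in a clean state computes exactly A's loop.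
theorem foldB_eq_loopA (byte : Int) : ∀ (cs : List Char) (m : Bool),
    pvFlush byte (cs.foldl (pvStep byte) (m, none, false)) = pvLoopA byte cs m := by
  intro cs m
  induction cs, m using pvLoopA.induct byte with
  | case1 m => simp [pvFlush, pvLoopA]
  | case2 ch e rest m ih =>
      simp only [pvLoopA, reduceIte, dite_eq_ite, pvIfOr] at ih ⊢
      simp only [List.foldl_cons, pvStep, reduceIte] at ih ⊢
      exact ih
  | case3 ch d e rest m hd ih =>
      simp only [pvLoopA, if_neg hd, dite_eq_ite, pvIfOr] at ih ⊢
      simp only [List.foldl_cons, pvStep, if_neg hd] at ih ⊢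
      exact ih
  | case4 ch rest m hshape ih =>
      match rest, hshape with
      | [], _ =>
          simp [pvLoopA, pvFlush, pvStep, Bool.or_comm]
      | [d], _ =>
          by_cases hd : d = '-'
          · subst hd
            simp [pvLoopA, pvFlush, pvStep, Bool.or_assoc, Bool.or_comm]
          · simp [pvLoopA, pvFlush, pvStep, hd, Bool.or_assoc, Bool.or_comm]
      | d :: e :: r, h => exact absurd rfl (fun hh => h d e r hh)

-- ===== VERDICT (by name: the statement is the Claim_ definition above) =====
theorem byte_matches_scanset_py_spec : Claim_equal_byte_matches_scanset_py := by
  intro byte scanset _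
  unfold Spec_byte_matches_scanset_py byte_matches_scanset_py byte_matches_scanset_py_alt
  by_cases h : scanset = ""
  · simp [h]
  · simp only [if_neg h, foldB_eq_loopA]
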